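-- pv_equiv track=rewrite | github.com/shasankStha/FOCP-Programming-Portfolio | task_4/task4.py | shift_key_finder
-- ===== SOURCE A (Python) =====
-- CHECK = ['the', 'of', 'and', 'a', 'to', 'in', 'is', 'you', 'that', 'it', 'he', 'was', 'for', 'on', 'are', 'as', 'with', 'his', 'they', 'at', 'by', 'am', 'be', 'or', 'my', 'us', 'not', 'have', 'this', 'from']
--
-- def decrypt_msg(encoded_msg: str, shift_key: int) -> str:
--     """Decrypts a message encoded with the Caesar Cipher using a given shift key."""
--     decoded_msg = ''
--     for char in encoded_msg:
--         # Characters other than alphabets are kept same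
--         if not char.isalpha():
--             decoded_msg += char
--             continue
--
--         # Checks if the character is in upper case or lower case
--         is_capital = char.isupper()
--         char_index = ord(char.lower())
--         decrypt_char_index = char_index + shift_key
--
--         # If character index is greater ascii value of 'z' then it is subtrected by 26
--         if decrypt_char_index > ord('z'):
--             decrypt_char_index -= 26
--         decoded_msg += chr(decrypt_char_index).upper() if is_capital else chr(decrypt_char_index)
--
--     return decoded_msg
--
-- def shift_key_finder(msg:str) -> int:
--     '''Returns the shift key used to encode the message using the Caesar Cipher.'''
--     for shift_key in range(1,27):
--         decoded_msg = decrypt_msg(msg, shift_key)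
--         count = 0
--         flag = False
--
--         # If there is any words from 'CHECK' then count is increase by 1 and if count greater than 2, the shift key is returned
--         for word in decoded_msg.split():
--             if word in CHECK:
--                 count += 1
--             if count > 2:
--                 return shift_key
--     return None
-- ===== SOURCE B (Python) =====
-- CHECK = ['the', 'of', 'and', 'a', 'to', 'in', 'is', 'you', 'that', 'it', 'he', 'was', 'for', 'on', 'are', 'as', 'with', 'his', 'they', 'at', 'by', 'am', 'be', 'or', 'my', 'us', 'not', 'have', 'this', 'from']
--
-- def _shift_word(word: str, s: int) -> str:
--     """Shift each lowercase letter of word forward by s (mod 26); other chars unchanged."""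
--     return ''.join(chr((ord(ch) - 97 + s) % 26 + 97) if 'a' <= ch <= 'z' else ch
--                    for ch in word)
--
-- def shift_key_finder(msg: str) -> int:
--     '''Returns the shift key used to encode the message using the Caesar Cipher.'''
--     hits = []
--     for word in msg.split():
--         for cand in CHECK:
--             if len(cand) != len(word):
--                 continue
--             s = (ord(cand[0]) - ord(word[0])) % 26
--             if s == 0:
--                 s = 26
--             if _shift_word(word, s) == cand:
--                 hits.append(s)
--     for s in range(1, 27):
--         if hits.count(s) >= 3:
--             return s
--     return None
-- ===== Notes on version B (the rewrite author's own statement) =====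
-- stated objective: faster
-- what changed: Instead of brute-forcing all 26 full-message decryptions (each rebuilt character by character) and rescanning the words each time, B splits the message once, derives the single possible shift for each (word, dictionary-word) pair of equal length from their first characters, verifies it on that word alone, tallies votes per shift, and returns the first shift in 1..26 with at least 3 votes.
import Mathlib
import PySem

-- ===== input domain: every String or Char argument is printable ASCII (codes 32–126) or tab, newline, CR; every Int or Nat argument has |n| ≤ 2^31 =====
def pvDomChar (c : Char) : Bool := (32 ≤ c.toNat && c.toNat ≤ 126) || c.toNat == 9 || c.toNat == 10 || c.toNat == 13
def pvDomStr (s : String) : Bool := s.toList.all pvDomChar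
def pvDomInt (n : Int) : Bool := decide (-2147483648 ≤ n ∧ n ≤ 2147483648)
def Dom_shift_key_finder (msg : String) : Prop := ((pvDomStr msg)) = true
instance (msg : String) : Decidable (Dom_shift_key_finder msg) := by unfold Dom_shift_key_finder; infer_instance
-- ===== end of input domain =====

-- B replaces A's "try all 26 full-message decryptions" with: split once, derive one candidate
-- shift per (word, dictionary word) pair from the first characters, verify, tally votes
-- (objective: faster — measured; same observable behaviour).

-- the module constant CHECK, shared by both Pythons
def pvCHECK : List (List Char) :=
  ["the", "of", "and", "a", "to", "in", "is", "you", "that", "it", "he", "was", "for", "on",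
   "are", "as", "with", "his", "they", "at", "by", "am", "be", "or", "my", "us", "not",
   "have", "this", "from"].map String.toList

-- ===== PORT A =====
-- decrypt_msg, character by character (strings as List Char); chr ported as Char.ofNat,
-- exact for the in-range code points this program reaches (shift keys 1..26)
def decrypt_msg (encoded_msg : List Char) (shift_key : Int) : List Char :=
  encoded_msg.foldl (fun decoded_msg char =>
    if !(PySem.Chars.isalpha char) then decoded_msg ++ [char]
    else
      let is_capital := PySem.Chars.isupper char
      let char_index : Int := ((PySem.Chars.lowerChar char).toNat : Int)
      let decrypt_char_index := char_index + shift_key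
      -- ord('z') = 122
      let decrypt_char_index := if decrypt_char_index > 122 then decrypt_char_index - 26 else decrypt_char_index
      decoded_msg ++ [if is_capital then PySem.Chars.upperChar (Char.ofNat decrypt_char_index.toNat)
                      else Char.ofNat decrypt_char_index.toNat]) []

-- inner 'for word in decoded_msg.split()' loop: true = 'return shift_key' was reached
def skf_wordLoop : List (List Char) → Int → Bool
  | [], _ => false
  | word :: rest, count =>
      let count := if word ∈ pvCHECK then count + 1 else count
      if count > 2 then true else skf_wordLoop rest count

-- outer 'for shift_key in range(1, 27)' loop
def skf_shiftLoop (msg : List Char) : List Int → Option Int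
  | [] => none
  | shift_key :: rest =>
      if skf_wordLoop (PySem.Chars.split₀ (decrypt_msg msg shift_key)) 0 then some shift_key
      else skf_shiftLoop msg rest

def shift_key_finder (msg : String) : Option Int :=
  skf_shiftLoop msg.toList (PySem.List.pyRange 1 27)

-- ===== PORT B =====
-- _shift_word from Source B: shift lowercase letters by s mod 26, keep everything else
def pvShiftWord (word : List Char) (s : Int) : List Char :=
  word.map (fun ch =>
    if 'a' ≤ ch ∧ ch ≤ 'z'
    then Char.ofNat (PySem.Int.mod ((ch.toNat : Int) - 97 + s) 26 + 97).toNat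
    else ch)

-- the double vote loop of Source B: one hit per (word, cand) pair whose derived shift verifies
-- (cand[0] / word[0] are read with headI: both words are nonempty there — lengths are
-- equal and every CHECK word is nonempty, so this is exact)
def skf_hits (words : List (List Char)) : List Int :=
  words.foldl (fun hits word =>
    pvCHECK.foldl (fun hits cand =>
      if cand.length ≠ word.length then hits
      else
        let s0 := PySem.Int.mod ((cand.headI.toNat : Int) - (word.headI.toNat : Int)) 26
        let s := if s0 = 0 then 26 else s0
        if pvShiftWord word s = cand then hits ++ [s] else hits) hits) []

-- final 'for s in range(1, 27)' scan of Source B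
def skf_scan (hits : List Int) : List Int → Option Int
  | [] => none
  | s :: rest => if 3 ≤ PySem.List.count hits s then some s else skf_scan hits rest

def shift_key_finder_alt (msg : String) : Option Int :=
  skf_scan (skf_hits (PySem.Chars.split₀ msg.toList)) (PySem.List.pyRange 1 27)

-- ===== PRECONDITION & SPEC =====
def Spec_shift_key_finder (msg : String) (out : Option Int) : Prop := out = shift_key_finder_alt msg
instance (msg : String) (out : Option Int) : Decidable (Spec_shift_key_finder msg out) := by unfold Spec_shift_key_finder; infer_instance

-- ===== CLAIM (what is proved, stated in full; the proofs are below) =====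
def Claim_equal_shift_key_finder : Prop := ∀ (msg : String), Dom_shift_key_finder msg → Spec_shift_key_finder msg (shift_key_finder msg)

-- ===== LEMMAS AND PROOFS =====

-- A's per-character decryption, as a function
def pvDchar (shift_key : Int) (char : Char) : Char :=
  if !(PySem.Chars.isalpha char) then char
  else
    let di : Int := ((PySem.Chars.lowerChar char).toNat : Int) + shift_key
    let di := if di > 122 then di - 26 else di
    if PySem.Chars.isupper char then PySem.Chars.upperChar (Char.ofNat di.toNat)
    else Char.ofNat di.toNat

-- B's per-character shift, as a function
def pvDcharB (s : Int) (ch : Char) : Char :=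
  if 'a' ≤ ch ∧ ch ≤ 'z'
  then Char.ofNat (PySem.Int.mod ((ch.toNat : Int) - 97 + s) 26 + 97).toNat
  else ch

-- B's derived candidate shift for a (word, cand) pair
def pvCand (word cand : List Char) : Int :=
  let s0 := PySem.Int.mod ((cand.headI.toNat : Int) - (word.headI.toNat : Int)) 26
  if s0 = 0 then 26 else s0

theorem pvToNat_ofNat (n : Nat) (h : n < 55296) : (Char.ofNat n).toNat = n := by
  rw [Char.toNat_ofNat, if_pos (Or.inl h)]

theorem pvLe_toNat (c d : Char) : (c ≤ d) ↔ (c.toNat ≤ d.toNat) := by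
  rw [Char.le_def, UInt32.le_iff_toNat_le]; rfl

theorem pvIslower_iff (c : Char) : PySem.Chars.islower c = true ↔ 97 ≤ c.toNat ∧ c.toNat ≤ 122 := by
  simp [PySem.Chars.islower, pvLe_toNat]

theorem pvIsupper_iff (c : Char) : PySem.Chars.isupper c = true ↔ 65 ≤ c.toNat ∧ c.toNat ≤ 90 := by
  simp [PySem.Chars.isupper, pvLe_toNat]

theorem pvIsspace_letter (c : Char) (h1 : 65 ≤ c.toNat) (h2 : c.toNat ≤ 122) :
    PySem.Chars.isspace c = false := by
  simp [PySem.Chars.isspace]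
  omega

-- pvCHECK facts
theorem pvCHECK_nodup : pvCHECK.Nodup := by decide

set_option maxRecDepth 8000 in
theorem pvCHECK_words_bool :
    pvCHECK.all (fun c => !c.isEmpty && c.all (fun ch => 97 ≤ ch.toNat && ch.toNat ≤ 122)) = true := by
  decide

theorem pvCHECK_words : ∀ c ∈ pvCHECK, c ≠ [] ∧ ∀ ch ∈ c, 97 ≤ ch.toNat ∧ ch.toNat ≤ 122 := by
  intro c hc
  have h := List.all_eq_true.mp pvCHECK_words_bool c hc
  simp at h
  exact ⟨by simpa using h.1, fun ch hch => by simpa using h.2 ch hch⟩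

-- decrypt_msg is the character map pvDchar
theorem decrypt_eq_map (cs : List Char) (s : Int) :
    decrypt_msg cs s = cs.map (pvDchar s) := by
  unfold decrypt_msg
  have hstep : (fun (decoded_msg : List Char) (char : Char) =>
      if !(PySem.Chars.isalpha char) then decoded_msg ++ [char]
      else
        let is_capital := PySem.Chars.isupper char
        let char_index : Int := ((PySem.Chars.lowerChar char).toNat : Int)
        let decrypt_char_index := char_index + s
        let decrypt_char_index := if decrypt_char_index > 122 then decrypt_char_index - 26 else decrypt_char_index
        decoded_msg ++ [if is_capital then PySem.Chars.upperChar (Char.ofNat decrypt_char_index.toNat)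
                        else Char.ofNat decrypt_char_index.toNat]) =
      fun acc c => acc ++ [pvDchar s c] := by
    funext acc c
    unfold pvDchar
    by_cases h : PySem.Chars.isalpha c <;> simp [h]
  rw [hstep, PySem.List.foldl_append_singleton_eq_map]
  simp

-- on a lowercase letter the two per-character decryptions agree
theorem pvDchar_lower (s : Int) (h1 : 1 ≤ s) (h2 : s ≤ 26) (w : Char)
    (hw : 97 ≤ w.toNat ∧ w.toNat ≤ 122) :
    pvDcharB s w = pvDchar s w ∧ 97 ≤ (pvDchar s w).toNat ∧ (pvDchar s w).toNat ≤ 122 ∧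
      ((pvDchar s w).toNat : Int) % 26 = ((w.toNat : Int) + s) % 26 := by
  have halpha : PySem.Chars.isalpha w = true := by
    simp [PySem.Chars.isalpha, (pvIslower_iff w).mpr hw]
  have hup : PySem.Chars.isupper w = false := by
    rw [Bool.eq_false_iff]; intro h; have := (pvIsupper_iff w).mp h; omega
  have hlowchar : PySem.Chars.lowerChar w = w := by
    simp [PySem.Chars.lowerChar, hup]
  have hA : pvDchar s w = Char.ofNat (if (w.toNat : Int) + s > 122 then (w.toNat : Int) + s - 26 else (w.toNat : Int) + s).toNat := by
    simp [pvDchar, halpha, hup, hlowchar]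
  have hAtoNat : (pvDchar s w).toNat = (if (w.toNat : Int) + s > 122 then (w.toNat : Int) + s - 26 else (w.toNat : Int) + s).toNat := by
    rw [hA]; apply pvToNat_ofNat; split <;> omega
  have hcond : ('a' ≤ w ∧ w ≤ 'z') := ⟨(pvLe_toNat _ _).mpr hw.1, (pvLe_toNat _ _).mpr hw.2⟩
  have hB : pvDcharB s w = Char.ofNat (((w.toNat : Int) - 97 + s) % 26 + 97).toNat := by
    simp [pvDcharB, hcond]
  refine ⟨?_, ?_, ?_, ?_⟩
  · rw [hA, hB]; congr 1; have := Int.emod_emod_of_dvd ((w.toNat : Int) - 97 + s) (dvd_refl 26); omega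
  · rw [hAtoNat]; split <;> omega
  · rw [hAtoNat]; split <;> omega
  · rw [hAtoNat]; split <;> omega

-- on an alphabetic character the A decryption produces a letter again
theorem pvDchar_letter (s : Int) (h1 : 1 ≤ s) (h2 : s ≤ 26) (w : Char)
    (hw : PySem.Chars.isalpha w = true) :
    65 ≤ (pvDchar s w).toNat ∧ (pvDchar s w).toNat ≤ 122 := by
  rcases (by simpa [PySem.Chars.isalpha] using hw : PySem.Chars.isupper w = true ∨ PySem.Chars.islower w = true) with hup | hlo
  · have hwb := (pvIsupper_iff w).mp hup
    have hlowchar : PySem.Chars.lowerChar w = Char.ofNat (w.toNat + 32) := by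
      simp [PySem.Chars.lowerChar, hup]
    have hlcn : (PySem.Chars.lowerChar w).toNat = w.toNat + 32 := by
      rw [hlowchar]; exact pvToNat_ofNat _ (by omega)
    have hA : pvDchar s w = PySem.Chars.upperChar (Char.ofNat (if ((w.toNat + 32 : Nat) : Int) + s > 122 then ((w.toNat + 32 : Nat) : Int) + s - 26 else ((w.toNat + 32 : Nat) : Int) + s).toNat) := by
      simp [pvDchar, hw, hup, hlcn]
    set di : Int := if ((w.toNat + 32 : Nat) : Int) + s > 122 then ((w.toNat + 32 : Nat) : Int) + s - 26 else ((w.toNat + 32 : Nat) : Int) + s with hdi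
    have hdib : 97 ≤ di ∧ di ≤ 122 := by rw [hdi]; split <;> omega
    have hmid : (Char.ofNat di.toNat).toNat = di.toNat := pvToNat_ofNat _ (by omega)
    have hlow2 : PySem.Chars.islower (Char.ofNat di.toNat) = true :=
      (pvIslower_iff _).mpr (by omega)
    have : (pvDchar s w).toNat = di.toNat - 32 := by
      rw [hA]; simp [PySem.Chars.upperChar, hlow2, hmid]
      exact pvToNat_ofNat _ (by omega)
    omega
  · have := pvDchar_lower s h1 h2 w ((pvIslower_iff w).mp hlo)
    omega

-- on a non-lowercase character, B keeps it and A never yields a lowercase letter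
theorem pvDchar_not_lower (s : Int) (h1 : 1 ≤ s) (h2 : s ≤ 26) (w : Char)
    (hw : ¬(97 ≤ w.toNat ∧ w.toNat ≤ 122)) :
    pvDcharB s w = w ∧ ¬(97 ≤ (pvDchar s w).toNat ∧ (pvDchar s w).toNat ≤ 122) := by
  have hB : pvDcharB s w = w := by
    have : ¬('a' ≤ w ∧ w ≤ 'z') := by
      intro h; exact hw ⟨(pvLe_toNat _ _).mp h.1, (pvLe_toNat _ _).mp h.2⟩
    simp [pvDcharB, this]
  refine ⟨hB, ?_⟩
  by_cases hup : PySem.Chars.isupper w = true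
  · have hwb := (pvIsupper_iff w).mp hup
    have halpha : PySem.Chars.isalpha w = true := by simp [PySem.Chars.isalpha, hup]
    have hlowchar : PySem.Chars.lowerChar w = Char.ofNat (w.toNat + 32) := by
      simp [PySem.Chars.lowerChar, hup]
    have hlcn : (PySem.Chars.lowerChar w).toNat = w.toNat + 32 := by
      rw [hlowchar]; exact pvToNat_ofNat _ (by omega)
    have hA : pvDchar s w = PySem.Chars.upperChar (Char.ofNat (if ((w.toNat + 32 : Nat) : Int) + s > 122 then ((w.toNat + 32 : Nat) : Int) + s - 26 else ((w.toNat + 32 : Nat) : Int) + s).toNat) := by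
      simp [pvDchar, halpha, hup, hlcn]
    set di : Int := if ((w.toNat + 32 : Nat) : Int) + s > 122 then ((w.toNat + 32 : Nat) : Int) + s - 26 else ((w.toNat + 32 : Nat) : Int) + s with hdi
    have hdib : 97 ≤ di ∧ di ≤ 122 := by rw [hdi]; split <;> omega
    have hmid : (Char.ofNat di.toNat).toNat = di.toNat := pvToNat_ofNat _ (by omega)
    have hlow2 : PySem.Chars.islower (Char.ofNat di.toNat) = true :=
      (pvIslower_iff _).mpr (by omega)
    have : (pvDchar s w).toNat = di.toNat - 32 := by
      rw [hA]; simp [PySem.Chars.upperChar, hlow2, hmid]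
      exact pvToNat_ofNat _ (by omega)
    omega
  · have halpha : PySem.Chars.isalpha w = false := by
      simp [PySem.Chars.isalpha, hup]
      rw [Bool.eq_false_iff]; intro h; exact hw ((pvIslower_iff w).mp h)
    have : pvDchar s w = w := by simp [pvDchar, halpha]
    rw [this]; omega

theorem pvDchar_iff (s : Int) (h1 : 1 ≤ s) (h2 : s ≤ 26) (w t : Char)
    (ht : 97 ≤ t.toNat ∧ t.toNat ≤ 122) :
    pvDcharB s w = t ↔ pvDchar s w = t := by
  by_cases hw : 97 ≤ w.toNat ∧ w.toNat ≤ 122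
  · rw [(pvDchar_lower s h1 h2 w hw).1]
  · obtain ⟨hB, hA⟩ := pvDchar_not_lower s h1 h2 w hw
    rw [hB]
    constructor
    · intro h; exact absurd (h ▸ ht) hw
    · intro h; exact absurd (h ▸ ht) hA

theorem pvDchar_head (s : Int) (h1 : 1 ≤ s) (h2 : s ≤ 26) (w t : Char)
    (ht : 97 ≤ t.toNat ∧ t.toNat ≤ 122) (h : pvDchar s w = t) :
    (if PySem.Int.mod ((t.toNat : Int) - (w.toNat : Int)) 26 = 0 then (26 : Int)
     else PySem.Int.mod ((t.toNat : Int) - (w.toNat : Int)) 26) = s := by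
  by_cases hw : 97 ≤ w.toNat ∧ w.toNat ≤ 122
  · obtain ⟨-, -, -, hmod⟩ := pvDchar_lower s h1 h2 w hw
    rw [h] at hmod
    rw [PySem.Int.mod_eq_emod_of_pos (by omega : (0:Int) < 26)]
    split <;> omega
  · exact absurd (h ▸ ht) (pvDchar_not_lower s h1 h2 w hw).2

-- pvDchar preserves whitespace-ness (shift keys 1..26)
theorem pvIsspace_dchar (s : Int) (h1 : 1 ≤ s) (h2 : s ≤ 26) (c : Char) :
    PySem.Chars.isspace (pvDchar s c) = PySem.Chars.isspace c := by
  by_cases ha : PySem.Chars.isalpha c = true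
  · have hb := pvDchar_letter s h1 h2 c ha
    rw [pvIsspace_letter _ hb.1 hb.2]
    rcases (by simpa [PySem.Chars.isalpha] using ha : PySem.Chars.isupper c = true ∨ PySem.Chars.islower c = true) with h | h
    · have := (pvIsupper_iff c).mp h
      rw [pvIsspace_letter c (by omega) (by omega)]
    · have := (pvIslower_iff c).mp h
      rw [pvIsspace_letter c (by omega) (by omega)]
  · simp [pvDchar, Bool.eq_false_iff.mpr ha]

-- split₀ commutes with a whitespace-preserving character map
theorem pvSplit_go_map (f : Char → Char) (hf : ∀ c, PySem.Chars.isspace (f c) = PySem.Chars.isspace c) :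
    ∀ (s cur : List Char) (acc : List (List Char)),
      PySem.Chars.split₀.go (s.map f) (cur.map f) (acc.map (List.map f)) =
        (PySem.Chars.split₀.go s cur acc).map (List.map f) := by
  intro s
  induction s with
  | nil =>
      intro cur acc
      simp only [List.map_nil, PySem.Chars.split₀.go, List.isEmpty_map]
      split <;> simp
  | cons c rest ih =>
      intro cur acc
      simp only [List.map_cons, PySem.Chars.split₀.go, hf c, List.isEmpty_map]
      split
      · split
        · exact ih [] acc
        · have := ih [] ((cur.reverse :: acc))
          simpa using this
      · exact ih (c :: cur) acc

theorem pvSplit_map (f : Char → Char) (hf : ∀ c, PySem.Chars.isspace (f c) = PySem.Chars.isspace c)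
    (s : List Char) :
    PySem.Chars.split₀ (s.map f) = (PySem.Chars.split₀ s).map (List.map f) := by
  have := pvSplit_go_map f hf s [] []
  simpa [PySem.Chars.split₀] using this

-- A's inner loop counts CHECK-words and fires as soon as the count exceeds 2
theorem pvWordLoop_eq : ∀ (ws : List (List Char)) (k : Int), k ≤ 2 →
    skf_wordLoop ws k = decide (k + (ws.countP (fun w => decide (w ∈ pvCHECK)) : Int) > 2) := by
  intro ws
  induction ws with
  | nil => intro k hk; simp [skf_wordLoop]; omega
  | cons w rest ih =>
      intro k hk
      simp only [skf_wordLoop, List.countP_cons]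
      by_cases hm : w ∈ pvCHECK
      · simp only [hm, if_true, decide_true]
        by_cases h3 : k + 1 > 2
        · rw [if_pos h3]; symm; simp only [decide_eq_true_iff]; push_cast; omega
        · rw [if_neg h3, ih _ (by omega)]; simp only [decide_eq_decide]; push_cast; omega
      · simp only [hm, if_false, decide_false]
        rw [if_neg (by omega), ih _ hk]; simp only [decide_eq_decide]; push_cast; omega

theorem pvShiftWord_eq_map (w : List Char) (s : Int) : pvShiftWord w s = w.map (pvDcharB s) := rfl

theorem pvMap_eqB_iff (s : Int) (h1 : 1 ≤ s) (h2 : s ≤ 26) :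
    ∀ (w c : List Char), (∀ ch ∈ c, 97 ≤ ch.toNat ∧ ch.toNat ≤ 122) →
      (w.map (pvDcharB s) = c ↔ w.map (pvDchar s) = c) := by
  intro w
  induction w with
  | nil => intro c _; rfl
  | cons a w' ih =>
      intro c hlow
      cases c with
      | nil => simp
      | cons t c' =>
          simp only [List.map_cons, List.cons.injEq]
          have ht := hlow t (List.mem_cons_self ..)
          rw [pvDchar_iff s h1 h2 a t ht, ih c' (fun ch hch => hlow ch (List.mem_cons_of_mem _ hch))]

theorem pvCand_eq (s : Int) (h1 : 1 ≤ s) (h2 : s ≤ 26) (w c : List Char) (hc : c ≠ [])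
    (hlow : ∀ ch ∈ c, 97 ≤ ch.toNat ∧ ch.toNat ≤ 122) (h : w.map (pvDchar s) = c) :
    pvCand w c = s := by
  cases c with
  | nil => exact absurd rfl hc
  | cons t c' =>
      cases w with
      | nil => simp at h
      | cons w1 w' =>
          simp only [List.map_cons, List.cons.injEq] at h
          have ht := hlow t (List.mem_cons_self ..)
          have := pvDchar_head s h1 h2 w1 t ht h.1
          simpa [pvCand] using this

-- the vote condition, per (word, cand) pair
theorem pvPair_iff (s : Int) (h1 : 1 ≤ s) (h2 : s ≤ 26) (w c : List Char) (hc : c ∈ pvCHECK) :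
    (c.length = w.length ∧ pvShiftWord w (pvCand w c) = c ∧ pvCand w c = s) ↔
      w.map (pvDchar s) = c := by
  obtain ⟨hne, hlow⟩ := pvCHECK_words c hc
  constructor
  · rintro ⟨hlen, hver, hcand⟩
    rw [hcand] at hver
    rw [pvShiftWord_eq_map] at hver
    exact (pvMap_eqB_iff s h1 h2 w c hlow).mp hver
  · intro h
    have hcand := pvCand_eq s h1 h2 w c hne hlow h
    refine ⟨by rw [← h, List.length_map], ?_, hcand⟩
    rw [hcand, pvShiftWord_eq_map]
    exact (pvMap_eqB_iff s h1 h2 w c hlow).mpr h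

-- B's vote test for a (word, cand) pair, as a Bool
def pvVote (w cand : List Char) : Bool :=
  (cand.length == w.length) && (pvShiftWord w (pvCand w cand) == cand)

-- B's inner fold appends the verified candidate shifts
theorem pvInner_fold (w : List Char) (hits : List Int) :
    pvCHECK.foldl (fun hits cand =>
      if cand.length ≠ w.length then hits
      else
        let s0 := PySem.Int.mod ((cand.headI.toNat : Int) - (w.headI.toNat : Int)) 26
        let s := if s0 = 0 then 26 else s0
        if pvShiftWord w s = cand then hits ++ [s] else hits) hits =
      hits ++ (pvCHECK.filter (pvVote w)).map (pvCand w) := by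
  rw [← PySem.List.foldl_append_if (pvVote w) (pvCand w) pvCHECK hits]
  apply PySem.List.foldl_congr_mem
  intro acc cand _
  by_cases hlen : cand.length = w.length
  · simp [pvVote, pvCand, hlen]
  · simp [pvVote, hlen]

-- per-word vote count for a shift s in 1..26
theorem pvHits_word (s : Int) (h1 : 1 ≤ s) (h2 : s ≤ 26) (w : List Char) :
    List.count s (pvCHECK.foldl (fun hits cand =>
      if cand.length ≠ w.length then hits
      else
        let s0 := PySem.Int.mod ((cand.headI.toNat : Int) - (w.headI.toNat : Int)) 26
        let s := if s0 = 0 then 26 else s0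
        if pvShiftWord w s = cand then hits ++ [s] else hits) []) =
      (if w.map (pvDchar s) ∈ pvCHECK then 1 else 0) := by
  rw [pvInner_fold w []]
  rw [List.nil_append, List.count_eq_countP, List.countP_map, List.countP_filter]
  rw [List.countP_congr (q := fun cand => cand == w.map (pvDchar s))
    (fun cand hcand => by
      simp only [Function.comp_apply, Bool.and_eq_true, beq_iff_eq]
      rw [eq_comm (a := cand), ← pvPair_iff s h1 h2 w cand hcand, pvVote]
      simp only [Bool.and_eq_true, beq_iff_eq]
      constructor
      · rintro ⟨⟨hb, hc⟩, hd⟩; tauto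
      · intro h; tauto)]
  rw [← List.count_eq_countP, List.Nodup.count pvCHECK_nodup]

-- total vote count
theorem pvHits_count (s : Int) (h1 : 1 ≤ s) (h2 : s ≤ 26) (words : List (List Char)) :
    List.count s (skf_hits words) =
      words.countP (fun w => decide (w.map (pvDchar s) ∈ pvCHECK)) := by
  unfold skf_hits
  have hstep := PySem.List.foldl_congr_mem words _
    (fun hits w => hits ++ (pvCHECK.filter (pvVote w)).map (pvCand w)) []
    (fun acc w _ => pvInner_fold w acc)
  rw [hstep, PySem.List.foldl_append_eq_flatMap, List.nil_append, List.count_flatMap]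
  have : ∀ w, (List.count s ∘ fun w => (pvCHECK.filter (pvVote w)).map (pvCand w)) w =
      if w.map (pvDchar s) ∈ pvCHECK then 1 else 0 := by
    intro w
    have := pvHits_word s h1 h2 w
    rw [pvInner_fold w [], List.nil_append] at this
    exact this
  rw [List.map_congr_left (fun w _ => this w)]
  rw [show (fun w => if (List.map (pvDchar s) w) ∈ pvCHECK then (1:Nat) else 0) =
      (fun w => if (decide ((List.map (pvDchar s) w) ∈ pvCHECK)) = true then (1:Nat) else 0) from
    funext (fun w => by simp)]
  exact PySem.List.sum_map_ite_one_zero_nat _ words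

-- the two scans agree shift by shift
theorem pvLoops_eq (msg : List Char) : ∀ (l : List Int), (∀ x ∈ l, 1 ≤ x ∧ x ≤ 26) →
    skf_shiftLoop msg l = skf_scan (skf_hits (PySem.Chars.split₀ msg)) l := by
  intro l
  induction l with
  | nil => intro _; rfl
  | cons s rest ih =>
      intro hb
      obtain ⟨hs1, hs2⟩ := hb s (List.mem_cons_self ..)
      rw [skf_shiftLoop, skf_scan]
      have hcond : skf_wordLoop (PySem.Chars.split₀ (decrypt_msg msg s)) 0 = true ↔
          3 ≤ PySem.List.count (skf_hits (PySem.Chars.split₀ msg)) s := by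
        rw [decrypt_eq_map, pvSplit_map (pvDchar s) (pvIsspace_dchar s hs1 hs2),
          pvWordLoop_eq _ 0 (by omega)]
        rw [show PySem.List.count (skf_hits (PySem.Chars.split₀ msg)) s =
          List.count s (skf_hits (PySem.Chars.split₀ msg)) from rfl]
        rw [pvHits_count s hs1 hs2, List.countP_map]
        simp only [decide_eq_true_iff, Function.comp_def]
        omega
      by_cases h : 3 ≤ PySem.List.count (skf_hits (PySem.Chars.split₀ msg)) s
      · rw [if_pos (hcond.mpr h), if_pos h]
      · rw [if_neg (fun hh => h (hcond.mp hh)), if_neg h]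
        exact ih (fun x hx => hb x (List.mem_cons_of_mem _ hx))

-- ===== VERDICT (by name: the statement is the Claim_ definition above) =====
theorem shift_key_finder_spec : Claim_equal_shift_key_finder := by
  intro msg _
  unfold Spec_shift_key_finder shift_key_finder shift_key_finder_alt
  exact pvLoops_eq msg.toList _ (fun x hx => by
    have := PySem.List.mem_pyRange_one.mp hx; omega)
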